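-- pv_equiv track=rewrite | github.com/wzygxr/shuati | class146_NQueensProblem/NQueens.py | chess_board_problem
-- ===== SOURCE A (Python) =====
-- def chess_board_problem(board, k):
--     """
--     POJ 1321 棋盘问题
--     题目链接：http://poj.org/problem?id=1321
--
--     题目描述：
--     在一个给定形状的棋盘（形状可能是不规则的）上面摆放棋子，棋子没有区别。
--     要求摆放时任意的两个棋子不能放在棋盘中的同一行或者同一列，请编程求解对于给定形状和大小的棋盘，
--     摆放k个棋子的所有可行的摆放方案C。
--
--     参数说明：
--     board: 棋盘，'#'表示可放置棋子的位置，'.'表示不可放置棋子的位置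
--     k: 需要放置的棋子数量
--
--     示例：
--     输入：
--     board = ["#.",".#"]
--     k = 1
--     输出：2
--
--     时间复杂度：O(2^n)
--     空间复杂度：O(n)
--     """
--     n = len(board)
--
--     def dfs(row, placed, used_cols):
--         """
--         深度优先搜索解决棋盘问题
--
--         :param row: 当前行
--         :param placed: 已放置棋子数
--         :param used_cols: 已使用的列
--         :return: 方案数
--         """
--         # 如果已经放置了k个棋子，找到一种方案
--         if placed == k:
--             return 1
--
--         # 如果已经搜索完所有行，但还未放置k个棋子
--         if row == n:
--             return 0
--
--         count = 0
--
--         # 不在当前行放置棋子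
--         count += dfs(row + 1, placed, used_cols)
--
--         # 在当前行尝试放置棋子
--         for col in range(n):
--             # 检查当前位置是否可以放置棋子
--             if board[row][col] == '#' and col not in used_cols:
--                 # 放置棋子
--                 used_cols.add(col)
--                 count += dfs(row + 1, placed + 1, used_cols)
--                 # 回溯
--                 used_cols.remove(col)
--
--         return count
--
--     return dfs(0, 0, set())
-- ===== SOURCE B (Python) =====
-- def chess_board_problem(board, k):
--     """Bottom-up DP over rows: dict mapping (placed, used-columns bitmask) -> ways."""
--     n = len(board)
--     dp = {(0, 0): 1}
--     for row in range(n):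
--         new = dict(dp)
--         for (placed, mask), ways in dp.items():
--             if placed < k:
--                 for col in range(n):
--                     if board[row][col] == '#' and (mask >> col) & 1 == 0:
--                         key = (placed + 1, mask | (1 << col))
--                         new[key] = new.get(key, 0) + ways
--         dp = new
--     return sum(ways for (placed, _), ways in dp.items() if placed == k)
-- ===== Notes on version B (the rewrite author's own statement) =====
-- stated objective: alternative
-- what changed: Replaced top-down backtracking DFS with set mutation by a bottom-up forward DP over rows on a dict keyed by (placed, used-columns bitmask), so equal states are shared instead of re-explored per path.
-- crash fix: When k < 0 and some row is shorter than len(board), A raises IndexError scanning columns while B's DP never extends any state and returns 0. — e.g. on chess_board_problem([""], -1): A raises IndexError, B returns 0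
import Mathlib
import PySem

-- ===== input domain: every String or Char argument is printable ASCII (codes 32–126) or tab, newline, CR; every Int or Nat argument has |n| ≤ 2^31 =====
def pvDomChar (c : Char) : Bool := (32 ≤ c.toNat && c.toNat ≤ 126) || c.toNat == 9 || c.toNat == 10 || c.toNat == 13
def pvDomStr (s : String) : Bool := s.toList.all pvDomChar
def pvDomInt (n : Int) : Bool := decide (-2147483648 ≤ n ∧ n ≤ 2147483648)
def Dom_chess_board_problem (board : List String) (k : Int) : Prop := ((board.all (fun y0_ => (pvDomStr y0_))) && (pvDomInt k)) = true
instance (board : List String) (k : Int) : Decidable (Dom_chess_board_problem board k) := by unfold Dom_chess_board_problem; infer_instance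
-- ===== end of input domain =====

-- B replaces A's exponential backtracking DFS by a bottom-up DP over rows on a dict of
-- (placed, used-columns-bitmask) states, sharing equal states instead of re-exploring them.

-- ===== PORT A =====
-- board[row][col] == '#'  (shared subexpression of both programs; none = IndexError, excluded by Pre_)
def pvCell (board : List String) (row col : Nat) : Bool :=
  ((PySem.List.pyGet? board (row : Int)).bind (fun s => PySem.Str.pyGet? s (col : Int))) == some '#'

def pvA_dfs (board : List String) (k : Int) (n : Nat) (row : Nat) (placed : Int)
    (used : PySem.Set Int) : Int :=
  if placed = k then 1
  else if row = n then 0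
  else if _h : row < n then
    -- count = 0; count += dfs(row+1, placed, used); for col in range(n): …
    (List.range n).foldl
      (fun count col =>
        if pvCell board row col ∧ ¬ ((col : Int) ∈ used) then
          count + pvA_dfs board k n (row + 1) (placed + 1) (PySem.Set.add used (col : Int))
        else count)
      (0 + pvA_dfs board k n (row + 1) placed used)
  else 0  -- unreachable: dfs is only ever called with row ≤ n
termination_by n - row

def chess_board_problem (board : List String) (k : Int) : Int :=
  pvA_dfs board k board.length 0 0 ([] : PySem.Set Int)

-- ===== PORT B =====
-- inner loop: for col in range(n): if board[row][col]=='#' and (mask>>col)&1==0: new[key] += ways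
def pvB_inner (board : List String) (n row : Nat) (placed : Int) (mask : Nat) (ways : Int)
    (new : PySem.Dict (Int × Nat) Int) : PySem.Dict (Int × Nat) Int :=
  (List.range n).foldl
    (fun new col =>
      if pvCell board row col ∧ (mask >>> col) &&& 1 = 0 then
        new.insert (placed + 1, mask ||| (1 <<< col))
          (new.getD (placed + 1, mask ||| (1 <<< col)) 0 + ways)
      else new)
    new

-- one row: new = dict(dp); for (placed, mask), ways in dp.items(): if placed < k: inner
def pvB_step (board : List String) (n : Nat) (k : Int) (row : Nat)
    (dp : PySem.Dict (Int × Nat) Int) : PySem.Dict (Int × Nat) Int :=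
  dp.items.foldl
    (fun new p => if p.1.1 < k then pvB_inner board n row p.1.1 p.1.2 p.2 new else new)
    dp

def chess_board_problem_alt (board : List String) (k : Int) : Int :=
  let n := board.length
  let dp := (List.range n).foldl (fun dp row => pvB_step board n k row dp)
    (PySem.Dict.ofList [(((0 : Int), (0 : Nat)), (1 : Int))])
  dp.items.foldl (fun acc p => if p.1.1 = k then acc + p.2 else acc) 0

-- ===== PRECONDITION & SPEC =====
-- Pre_ excludes exactly the inputs where Python A raises IndexError: unless k == 0 (A returns 1
-- before touching the board), A scans board[row][col] for all row, col < len(board), so every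
-- row must have length ≥ len(board).
def Pre_chess_board_problem (board : List String) (k : Int) : Prop :=
  k = 0 ∨ ∀ s ∈ board, (board.length : Int) ≤ PySem.Str.len s
instance (board : List String) (k : Int) : Decidable (Pre_chess_board_problem board k) := by
  unfold Pre_chess_board_problem; infer_instance

def pvWitness_chess_board_problem : List String × Int := (["#.", ".#"], 1)

-- When k < 0 and some row is shorter than len(board), A raises IndexError scanning columns
-- while B's DP never extends any state (placed < k is impossible) and returns 0.
def Raises_chess_board_problem (board : List String) (k : Int) : Prop :=
  k < 0 ∧ ∃ s ∈ board, PySem.Str.len s < (board.length : Int)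
instance (board : List String) (k : Int) : Decidable (Raises_chess_board_problem board k) := by
  unfold Raises_chess_board_problem; infer_instance

def pvRaiseWitness_chess_board_problem : List String × Int := ([""], -1)
def pvRaiseWitnessOut_chess_board_problem : Int := 0

def Spec_chess_board_problem (board : List String) (k : Int) (out : Int) : Prop :=
  out = chess_board_problem_alt board k
instance (board : List String) (k : Int) (out : Int) : Decidable (Spec_chess_board_problem board k out) := by
  unfold Spec_chess_board_problem; infer_instance

-- ===== CLAIM (what is proved, stated in full; the proofs are below) =====
def Claim_equal_chess_board_problem : Prop := ∀ (board : List String) (k : Int), Dom_chess_board_problem board k → Pre_chess_board_problem board k → Spec_chess_board_problem board k (chess_board_problem board k)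

def Claim_raises_chess_board_problem : Prop := (∀ (board : List String) (k : Int), Dom_chess_board_problem board k → Raises_chess_board_problem board k → ¬ Pre_chess_board_problem board k) ∧ (Dom_chess_board_problem (pvRaiseWitness_chess_board_problem.1) (pvRaiseWitness_chess_board_problem.2) ∧ Raises_chess_board_problem (pvRaiseWitness_chess_board_problem.1) (pvRaiseWitness_chess_board_problem.2) ∧ chess_board_problem_alt (pvRaiseWitness_chess_board_problem.1) (pvRaiseWitness_chess_board_problem.2) = pvRaiseWitnessOut_chess_board_problem)

-- ===== LEMMAS AND PROOFS =====

def pvN (board : List String) (n : Nat) (row : Nat) (j : Int) (mask : Nat) : Int :=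
  if j = 0 then 1
  else if row = n then 0
  else if _h : row < n then
    pvN board n (row + 1) j mask +
      ((List.range n).map (fun col =>
        if pvCell board row col ∧ (mask >>> col) &&& 1 = 0 then
          pvN board n (row + 1) (j - 1) (mask ||| (1 <<< col))
        else 0)).sum
  else 0
termination_by n - row

theorem pvBit_eq (m c : Nat) : (m >>> c) &&& 1 = if m.testBit c then 1 else 0 := by
  rw [Nat.testBit, Nat.and_one_is_mod]
  rcases Nat.mod_two_eq_zero_or_one (m >>> c) with h | h <;> simp [h]

theorem pvN_neg (board : List String) (n : Nat) : ∀ (fuel row : Nat) (j : Int) (mask : Nat),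
    n - row ≤ fuel → j < 0 → pvN board n row j mask = 0 := by
  intro fuel
  induction fuel with
  | zero =>
    intro row j mask hf hj
    rw [pvN]
    have hrow : ¬ row < n := by omega
    simp [hj.ne, hrow]
  | succ f ih =>
    intro row j mask hf hj
    rw [pvN]
    by_cases hr : row = n
    · simp [hj.ne, hr]
    · have hlt : row < n ∨ ¬ row < n := em _
      rcases Nat.lt_or_ge row n with hlt | hge
      · simp only [hj.ne, if_false, hr, dif_pos hlt]
        rw [ih (row+1) j mask (by omega) hj]
        have : ∀ col ∈ List.range n,
            (if pvCell board row col ∧ (mask >>> col) &&& 1 = 0 then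
              pvN board n (row + 1) (j - 1) (mask ||| (1 <<< col)) else 0) = 0 := by
          intro col _
          split
          · exact ih (row+1) (j-1) _ (by omega) (by omega)
          · rfl
        rw [List.map_congr_left this]
        simp
      · simp [hj.ne, hr, show ¬ row < n by omega]

theorem pvTestBit_shiftLeft_one (col c : Nat) : (1 <<< col).testBit c = decide (col = c) := by
  rcases eq_or_ne col c with h | h
  · simp [h]
  · simp [Nat.shiftLeft_eq, h]

theorem pvA_dfs_eq_pvN (board : List String) (k : Int) (n : Nat) :
    ∀ (fuel row : Nat), n - row ≤ fuel → ∀ (placed : Int) (used : PySem.Set Int) (mask : Nat),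
      (∀ c : Nat, c < n → (((c : Int)) ∈ used ↔ mask.testBit c)) →
      pvA_dfs board k n row placed used = pvN board n row (k - placed) mask := by
  intro fuel
  induction fuel with
  | zero =>
    intro row hf placed used mask hR
    rw [pvA_dfs, pvN]
    by_cases hp : placed = k
    · simp [hp]
    · have hj : ¬ (k - placed = 0) := by omega
      have hrow : ¬ row < n := by omega
      simp [hp, hj, hrow]
  | succ f ih =>
    intro row hf placed used mask hR
    rw [pvA_dfs, pvN]
    by_cases hp : placed = k
    · simp [hp]
    · have hj : ¬ (k - placed = 0) := by omega
      have hpk : ¬ (k = placed) := fun h => hp h.symm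
      by_cases hr : row = n
      · simp [hp, hj, hr]
      · rcases Nat.lt_or_ge row n with hlt | hge
        · simp only [hp, if_false, hj, hr, dif_pos hlt]
          rw [zero_add, ih (row+1) (by omega) placed used mask hR]
          rw [PySem.List.foldl_congr_mem' (List.range n)
            (fun count col =>
              if pvCell board row col ∧ ¬ ((col : Int) ∈ used) then
                count + pvA_dfs board k n (row + 1) (placed + 1) (PySem.Set.add used (col : Int))
              else count)
            (fun count col => count +
              (if pvCell board row col ∧ (mask >>> col) &&& 1 = 0 then
                pvN board n (row + 1) (k - placed - 1) (mask ||| (1 <<< col)) else 0))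
            (pvN board n (row + 1) (k - placed) mask)
            (by
              intro col hcol count
              dsimp only
              have hcoln : col < n := List.mem_range.mp hcol
              have hbit : ((col : Int) ∈ used) ↔ mask.testBit col := hR col hcoln
              have hcond : (¬ ((col : Int) ∈ used)) ↔ (mask >>> col) &&& 1 = 0 := by
                rw [hbit, pvBit_eq]
                rcases Bool.eq_false_or_eq_true (mask.testBit col) with h | h <;> simp [h]
              by_cases hc : pvCell board row col ∧ ¬ ((col : Int) ∈ used)
              · have hc' : pvCell board row col ∧ (mask >>> col) &&& 1 = 0 :=
                  ⟨hc.1, hcond.mp hc.2⟩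
                rw [if_pos hc, if_pos hc']
                congr 1
                have hR' : ∀ c : Nat, c < n →
                    (((c : Int)) ∈ PySem.Set.add used (col : Int) ↔ (mask ||| (1 <<< col)).testBit c) := by
                  intro c hcn
                  rw [PySem.Set.mem_add, Nat.testBit_or, pvTestBit_shiftLeft_one, hR c hcn]
                  simp [Nat.cast_inj]
                  tauto
                rw [ih (row+1) (by omega) (placed+1) _ _ hR']
                congr 1
                omega
              · have hc' : ¬ (pvCell board row col ∧ (mask >>> col) &&& 1 = 0) := by
                  intro h; exact hc ⟨h.1, hcond.mpr h.2⟩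
                rw [if_neg hc, if_neg hc']
                omega)]
          rw [PySem.List.foldl_add]
        · simp [hp, hj, hr, show ¬ row < n by omega]

-- index set of possible DP keys
def pvI (n : Nat) : Finset (Int × Nat) :=
  ((Finset.range (n + 1)).image (fun j : Nat => (j : Int))) ×ˢ Finset.range (2 ^ n)

theorem pvI_mem (n : Nat) (q : Int × Nat) :
    q ∈ pvI n ↔ (0 ≤ q.1 ∧ q.1 ≤ (n : Int)) ∧ q.2 < 2 ^ n := by
  unfold pvI
  simp [Finset.mem_product]
  intro _
  constructor
  · rintro ⟨a, ha, hae⟩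
    omega
  · rintro ⟨h0, hn⟩
    exact ⟨q.1.toNat, by omega, by omega⟩

-- weighted sum of a DP dict over all possible keys
def pvPhi (n : Nat) (w : Int × Nat → Int) (d : PySem.Dict (Int × Nat) Int) : Int :=
  ∑ q ∈ pvI n, d.getD q 0 * w q

theorem pvPhi_insert (n : Nat) (w : Int × Nat → Int) (d : PySem.Dict (Int × Nat) Int)
    (q0 : Int × Nat) (c : Int) (hq : q0 ∈ pvI n) :
    pvPhi n w (d.insert q0 (d.getD q0 0 + c)) = pvPhi n w d + c * w q0 := by
  unfold pvPhi
  have h : ∀ q ∈ pvI n, (d.insert q0 (d.getD q0 0 + c)).getD q 0 * w q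
      = d.getD q 0 * w q + (if q = q0 then c * w q else 0) := by
    intro q _
    rw [PySem.Dict.getD_insert]
    split_ifs with hqq
    · subst hqq; ring
    · ring
  rw [Finset.sum_congr rfl h, Finset.sum_add_distrib,
    Finset.sum_ite_eq' (pvI n) q0 (fun q => c * w q), if_pos hq]

theorem pvPhi_inner (board : List String) (n row : Nat) (w : Int × Nat → Int)
    (jv : Int) (mask : Nat) (c : Int)
    (hj0 : 0 ≤ jv) (hjn : jv < (n : Int)) (hm : mask < 2 ^ n) :
    ∀ (l : List Nat), (∀ col ∈ l, col < n) →
    ∀ (new : PySem.Dict (Int × Nat) Int),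
    pvPhi n w (l.foldl
      (fun new col =>
        if pvCell board row col ∧ (mask >>> col) &&& 1 = 0 then
          new.insert (jv + 1, mask ||| (1 <<< col))
            (new.getD (jv + 1, mask ||| (1 <<< col)) 0 + c)
        else new) new)
    = pvPhi n w new +
      c * (l.map (fun col =>
        if pvCell board row col ∧ (mask >>> col) &&& 1 = 0 then
          w (jv + 1, mask ||| (1 <<< col))
        else 0)).sum := by
  intro l
  induction l with
  | nil => intro _ new; simp
  | cons col rest ih =>
    intro hl new
    have hcol : col < n := hl col (List.mem_cons_self)
    rw [List.foldl_cons, List.map_cons, List.sum_cons,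
      ih (fun c hc => hl c (List.mem_cons_of_mem _ hc))]
    have hkey : ((jv + 1 : Int), mask ||| (1 <<< col)) ∈ pvI n := by
      rw [pvI_mem]
      refine ⟨⟨by omega, by omega⟩, ?_⟩
      refine Nat.or_lt_two_pow hm ?_
      rw [Nat.shiftLeft_eq, one_mul]
      exact Nat.pow_lt_pow_right (by omega) hcol
    split_ifs with hc
    · rw [pvPhi_insert n w new _ c hkey]; ring
    · ring

-- contribution of one dict entry at row `row` with weight w for the next row
def pvH (board : List String) (n row : Nat) (k : Int) (w : Int × Nat → Int)
    (q : Int × Nat) : Int :=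
  if q.1 < k then
    ((List.range n).map (fun col =>
      if pvCell board row col ∧ (q.2 >>> col) &&& 1 = 0 then
        w (q.1 + 1, q.2 ||| (1 <<< col))
      else 0)).sum
  else 0

theorem pvPhi_step_aux (board : List String) (n row : Nat) (k : Int) (w : Int × Nat → Int)
    (hrow : row < n) :
    ∀ (l : List ((Int × Nat) × Int)),
      (∀ p ∈ l, 0 ≤ p.1.1 ∧ p.1.1 ≤ (row : Int) ∧ p.1.2 < 2 ^ n) →
    ∀ (new : PySem.Dict (Int × Nat) Int),
    pvPhi n w (l.foldl
      (fun new p => if p.1.1 < k then pvB_inner board n row p.1.1 p.1.2 p.2 new else new) new)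
    = pvPhi n w new + (l.map (fun p => p.2 * pvH board n row k w p.1)).sum := by
  intro l
  induction l with
  | nil => intro _ new; simp
  | cons p rest ih =>
    intro hl new
    have hp := hl p (List.mem_cons_self)
    rw [List.foldl_cons, List.map_cons, List.sum_cons,
      ih (fun x hx => hl x (List.mem_cons_of_mem _ hx))]
    unfold pvH
    split_ifs with hc
    · rw [pvB_inner, pvPhi_inner board n row w p.1.1 p.1.2 p.2 hp.1 (by omega) hp.2.2
        (List.range n) (fun c hc => List.mem_range.mp hc) new]
      ring
    · ring

-- one dict entry's ghost weight at row r satisfies the backward recursion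
theorem pvN_rec (board : List String) (n row : Nat) (k : Int) (hrow : row < n)
    (q : Int × Nat) :
    pvN board n row (k - q.1) q.2
      = pvN board n (row + 1) (k - q.1) q.2
        + pvH board n row k (fun q' => pvN board n (row + 1) (k - q'.1) q'.2) q := by
  unfold pvH
  by_cases hj : k - q.1 = 0
  · rw [pvN, if_pos hj, pvN, if_pos hj, if_neg (by omega)]
    ring
  · rw [pvN, if_neg hj, if_neg (by omega), dif_pos hrow]
    by_cases hq : q.1 < k
    · rw [if_pos hq]
      congr 1
      refine congrArg List.sum (List.map_congr_left (f := fun col =>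
          if pvCell board row col = true ∧ q.2 >>> col &&& 1 = 0 then
            pvN board n (row + 1) (k - q.1 - 1) (q.2 ||| 1 <<< col)
          else (0:Int)) ?_)
      intro col _
      dsimp only
      split_ifs with hc
      · congr 1; omega
      · rfl
    · rw [if_neg hq]
      have hneg : k - q.1 - 1 < 0 := by omega
      have : ∀ col ∈ List.range n,
          (if pvCell board row col ∧ (q.2 >>> col) &&& 1 = 0 then
            pvN board n (row + 1) (k - q.1 - 1) (q.2 ||| (1 <<< col)) else 0) = 0 := by
        intro col _
        split_ifs with hc
        · exact pvN_neg board n (n - (row+1)) (row+1) _ _ (le_refl _) hneg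
        · rfl
      rw [List.map_congr_left this]
      simp

-- items sum against a weight = Phi-style sum (keys inside pvI, unique)
theorem pvSum_items_eq (n : Nat) (d : PySem.Dict (Int × Nat) Int) (H : Int × Nat → Int)
    (hnd : d.keys.Nodup) (hki : ∀ a ∈ d.keys, a ∈ pvI n) :
    (d.items.map (fun p => p.2 * H p.1)).sum = ∑ q ∈ pvI n, d.getD q 0 * H q := by
  rw [PySem.Dict.items_eq_map_keys d hnd 0, List.map_map]
  have : (fun p : (Int × Nat) × Int => p.2 * H p.1) ∘ (fun a => (a, d.getD a 0))
      = fun a => d.getD a 0 * H a := rfl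
  rw [this, ← List.sum_toFinset _ hnd]
  apply Finset.sum_subset
  · intro a ha
    exact hki a (List.mem_toFinset.mp ha)
  · intro q _ hq
    have : d.contains q = false := by
      rcases Bool.eq_false_or_eq_true (d.contains q) with h | h
      · exact absurd (List.mem_toFinset.mpr ((PySem.Dict.contains_iff_mem_keys d q).mp h)) hq
      · exact h
    rw [PySem.Dict.getD_of_not_contains d 0 this]
    ring

theorem pvB_inner_nodup (board : List String) (n row : Nat) (jv : Int) (mask : Nat) (c : Int) :
    ∀ (l : List Nat) (new : PySem.Dict (Int × Nat) Int), new.keys.Nodup →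
      (l.foldl (fun new col =>
        if pvCell board row col ∧ (mask >>> col) &&& 1 = 0 then
          new.insert (jv + 1, mask ||| (1 <<< col))
            (new.getD (jv + 1, mask ||| (1 <<< col)) 0 + c)
        else new) new).keys.Nodup := by
  intro l
  induction l with
  | nil => intro new h; exact h
  | cons col rest ih =>
    intro new h
    rw [List.foldl_cons]
    apply ih
    split_ifs with hc
    · exact PySem.Dict.nodup_keys_insert _ _ _ h
    · exact h

theorem pvB_inner_bound (board : List String) (n row : Nat) (jv : Int) (mask : Nat) (c : Int)
    (hj0 : 0 ≤ jv) (hjr : jv ≤ (row : Int)) (hm : mask < 2 ^ n) :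
    ∀ (l : List Nat), (∀ col ∈ l, col < n) →
    ∀ (new : PySem.Dict (Int × Nat) Int),
      (∀ p ∈ new.items, 0 ≤ p.1.1 ∧ p.1.1 ≤ (row : Int) + 1 ∧ p.1.2 < 2 ^ n) →
    ∀ p ∈ (l.foldl (fun new col =>
        if pvCell board row col ∧ (mask >>> col) &&& 1 = 0 then
          new.insert (jv + 1, mask ||| (1 <<< col))
            (new.getD (jv + 1, mask ||| (1 <<< col)) 0 + c)
        else new) new).items, 0 ≤ p.1.1 ∧ p.1.1 ≤ (row : Int) + 1 ∧ p.1.2 < 2 ^ n := by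
  intro l
  induction l with
  | nil => intro _ new h; exact h
  | cons col rest ih =>
    intro hl new h
    rw [List.foldl_cons]
    apply ih (fun x hx => hl x (List.mem_cons_of_mem _ hx))
    split_ifs with hc
    · intro p hp
      rcases (PySem.Dict.mem_items_insert _ _ _ _).mp hp with hpe | ⟨hpm, _⟩
      · subst hpe
        dsimp only
        refine ⟨by omega, by omega, ?_⟩
        refine Nat.or_lt_two_pow hm ?_
        rw [Nat.shiftLeft_eq, one_mul]
        exact Nat.pow_lt_pow_right (by omega) (hl col List.mem_cons_self)
      · exact h p hpm
    · exact h

theorem pvB_step_nodup (board : List String) (n : Nat) (k : Int) (row : Nat) :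
    ∀ (l : List ((Int × Nat) × Int)) (new : PySem.Dict (Int × Nat) Int), new.keys.Nodup →
      (l.foldl (fun new p =>
        if p.1.1 < k then pvB_inner board n row p.1.1 p.1.2 p.2 new else new) new).keys.Nodup := by
  intro l
  induction l with
  | nil => intro new h; exact h
  | cons p rest ih =>
    intro new h
    rw [List.foldl_cons]
    apply ih
    split_ifs with hc
    · exact pvB_inner_nodup board n row p.1.1 p.1.2 p.2 (List.range n) new h
    · exact h

theorem pvB_step_bound (board : List String) (n : Nat) (k : Int) (row : Nat) :
    ∀ (l : List ((Int × Nat) × Int)),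
      (∀ p ∈ l, 0 ≤ p.1.1 ∧ p.1.1 ≤ (row : Int) ∧ p.1.2 < 2 ^ n) →
    ∀ (new : PySem.Dict (Int × Nat) Int),
      (∀ p ∈ new.items, 0 ≤ p.1.1 ∧ p.1.1 ≤ (row : Int) + 1 ∧ p.1.2 < 2 ^ n) →
    ∀ p ∈ (l.foldl (fun new p =>
        if p.1.1 < k then pvB_inner board n row p.1.1 p.1.2 p.2 new else new) new).items,
      0 ≤ p.1.1 ∧ p.1.1 ≤ (row : Int) + 1 ∧ p.1.2 < 2 ^ n := by
  intro l
  induction l with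
  | nil => intro _ new h; exact h
  | cons p rest ih =>
    intro hl new h
    have hp := hl p (List.mem_cons_self)
    rw [List.foldl_cons]
    apply ih (fun x hx => hl x (List.mem_cons_of_mem _ hx))
    split_ifs with hc
    · exact pvB_inner_bound board n row p.1.1 p.1.2 p.2 hp.1 hp.2.1 hp.2.2
        (List.range n) (fun x hx => List.mem_range.mp hx) new h
    · exact h

-- the DP dict after processing rows 0..t-1
def pvDP (board : List String) (n : Nat) (k : Int) (t : Nat) : PySem.Dict (Int × Nat) Int :=
  (List.range t).foldl (fun dp row => pvB_step board n k row dp)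
    (PySem.Dict.ofList [(((0 : Int), (0 : Nat)), (1 : Int))])

theorem pvPhi_base (board : List String) (n : Nat) (k : Int) :
    pvPhi n (fun q => pvN board n 0 (k - q.1) q.2) (pvDP board n k 0) = pvN board n 0 k 0 := by
  unfold pvPhi pvDP
  rw [List.range_zero, List.foldl_nil]
  have h : ∀ q ∈ pvI n, (PySem.Dict.ofList [(((0:Int),(0:Nat)), (1:Int))]).getD q 0
      * pvN board n 0 (k - q.1) q.2
      = if q = ((0:Int),(0:Nat)) then pvN board n 0 (k - q.1) q.2 else 0 := by
    intro q _
    rw [show (PySem.Dict.ofList [(((0:Int),(0:Nat)), (1:Int))])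
      = (PySem.Dict.empty).insert ((0:Int),(0:Nat)) 1 from rfl, PySem.Dict.getD_insert]
    split_ifs <;> simp [PySem.Dict.getD_empty]
  rw [Finset.sum_congr rfl h,
    Finset.sum_ite_eq' (pvI n) ((0:Int),(0:Nat)) (fun q => pvN board n 0 (k - q.1) q.2)]
  rw [if_pos (by rw [pvI_mem]; exact ⟨⟨le_refl _, by omega⟩, Nat.two_pow_pos n⟩)]
  norm_num

theorem pvDP_succ (board : List String) (n : Nat) (k : Int) (t : Nat) :
    pvDP board n k (t + 1) = pvB_step board n k t (pvDP board n k t) := by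
  unfold pvDP
  rw [List.range_succ, List.foldl_append, List.foldl_cons, List.foldl_nil]

theorem pvDP_inv (board : List String) (n : Nat) (k : Int) :
    ∀ t, t ≤ n →
      (pvDP board n k t).keys.Nodup ∧
      (∀ p ∈ (pvDP board n k t).items, 0 ≤ p.1.1 ∧ p.1.1 ≤ (t : Int) ∧ p.1.2 < 2 ^ n) ∧
      pvPhi n (fun q => pvN board n t (k - q.1) q.2) (pvDP board n k t) = pvN board n 0 k 0 := by
  intro t
  induction t with
  | zero =>
    intro _
    refine ⟨?_, ?_, pvPhi_base board n k⟩
    · unfold pvDP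
      rw [List.range_zero, List.foldl_nil]
      decide
    · unfold pvDP
      rw [List.range_zero, List.foldl_nil]
      intro p hp
      have hpe : p = (((0:Int),(0:Nat)), (1:Int)) := by
        simpa [show (PySem.Dict.ofList [(((0:Int),(0:Nat)), (1:Int))]).items
          = [(((0:Int),(0:Nat)), (1:Int))] from rfl] using hp
      subst hpe
      exact ⟨by norm_num, by norm_num, Nat.two_pow_pos n⟩
  | succ t ih =>
    intro ht
    obtain ⟨hnd, hbound, hphi⟩ := ih (by omega)
    have htn : t < n := by omega
    constructor
    · rw [pvDP_succ]
      unfold pvB_step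
      exact pvB_step_nodup board n k t _ _ hnd
    constructor
    · rw [pvDP_succ]
      unfold pvB_step
      intro p hp
      have := pvB_step_bound board n k t (pvDP board n k t).items hbound (pvDP board n k t)
        (fun p hp => by
          obtain ⟨h1, h2, h3⟩ := hbound p hp
          exact ⟨h1, by omega, h3⟩) p hp
      push_cast
      push_cast at this
      exact this
    · rw [pvDP_succ]
      unfold pvB_step
      rw [pvPhi_step_aux board n t k _ htn (pvDP board n k t).items hbound (pvDP board n k t)]
      rw [pvSum_items_eq n (pvDP board n k t)
        (pvH board n t k (fun q => pvN board n (t + 1) (k - q.1) q.2)) hnd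
        (fun a ha => by
          rcases List.mem_map.mp (by simpa [PySem.Dict.keys] using ha :
            a ∈ (pvDP board n k t).items.map (·.1)) with ⟨p, hp, hpe⟩
          obtain ⟨h1, h2, h3⟩ := hbound p hp
          rw [← hpe, pvI_mem]
          exact ⟨⟨by omega, by omega⟩, by omega⟩)]
      unfold pvPhi
      rw [← Finset.sum_add_distrib]
      rw [← hphi]
      unfold pvPhi
      apply Finset.sum_congr rfl
      intro q _
      rw [← mul_add, ← pvN_rec board n t k htn q]

theorem pvAlt_eq (board : List String) (k : Int) :
    chess_board_problem_alt board k = pvN board board.length 0 k 0 := by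
  obtain ⟨hnd, hbound, hphi⟩ := pvDP_inv board board.length k board.length (le_refl _)
  unfold chess_board_problem_alt
  dsimp only
  rw [show (List.range board.length).foldl
      (fun dp row => pvB_step board board.length k row dp)
      (PySem.Dict.ofList [(((0 : Int), (0 : Nat)), (1 : Int))])
    = pvDP board board.length k board.length from rfl]
  rw [PySem.List.foldl_congr_mem' _ _
    (fun acc (p : (Int × Nat) × Int) => acc + (if p.1.1 = k then p.2 else 0)) _
    (by intro p _ acc; dsimp only; split_ifs <;> omega)]
  rw [PySem.List.foldl_add, zero_add]
  rw [List.map_congr_left (g := fun p : (Int × Nat) × Int =>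
      p.2 * (if p.1.1 = k then 1 else 0))
    (by intro p _; dsimp only; split_ifs <;> ring)]
  rw [pvSum_items_eq board.length _ (fun q => if q.1 = k then 1 else 0) hnd
    (fun a ha => by
      rcases List.mem_map.mp (by simpa [PySem.Dict.keys] using ha :
        a ∈ (pvDP board board.length k board.length).items.map (·.1)) with ⟨p, hp, hpe⟩
      obtain ⟨h1, h2, h3⟩ := hbound p hp
      rw [← hpe, pvI_mem]
      exact ⟨⟨by omega, by omega⟩, by omega⟩)]
  rw [← hphi]
  unfold pvPhi
  apply Finset.sum_congr rfl
  intro q _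
  congr 1
  have he : pvN board board.length board.length (k - q.1) q.2
      = if k - q.1 = 0 then 1 else (0:Int) := by
    rw [pvN]
    by_cases hq : k - q.1 = 0
    · simp [hq]
    · simp [hq]
  dsimp only
  rw [he]
  split_ifs <;> omega

theorem pvA_eq (board : List String) (k : Int) :
    chess_board_problem board k = pvN board board.length 0 k 0 := by
  unfold chess_board_problem
  rw [pvA_dfs_eq_pvN board k board.length board.length 0 (by omega) 0 [] 0
    (by intro c hc; simp [Nat.zero_testBit])]
  norm_num

-- ===== VERDICT (by name: the statement is the Claim_ definition above) =====
theorem chess_board_problem_spec : Claim_equal_chess_board_problem := by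
  intro board k _ _
  unfold Spec_chess_board_problem
  rw [pvA_eq, pvAlt_eq]

@[simp] theorem chess_board_problem_raises : Claim_raises_chess_board_problem := by
  unfold Claim_raises_chess_board_problem
  refine ⟨?_, by decide⟩
  intro board k _ hr hpre
  obtain ⟨hk, s, hs, hlen⟩ := hr
  rcases hpre with h | h
  · omega
  · exact absurd (h s hs) (by omega)
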